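-- pv_equiv track=rewrite | github.com/Abhishek-S-2001/Code-with-me | Codeforces/1520A - Do Not Be Distracted!.py | is_teacher_suspicious
-- ===== SOURCE A (Python) =====
-- def is_teacher_suspicious(n, tasks):
--     visited_tasks = set()
--     last_task = None  # Keep track of the last solved task
--
--     for task in tasks:
--         if task != last_task:  # We switched to a new task
--             if task in visited_tasks:  # If it's already completed before, return NO
--                 return "NO"
--             visited_tasks.add(task)  # Mark the task as completed
--         last_task = task  # Update the last task
--
--     return "YES"
-- ===== SOURCE B (Python) =====
-- def is_teacher_suspicious(n, tasks):
--     # Suspicious iff the sequence contains a forbidden subsequence  t ... me ... t  with t != me: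
--     # some task recurs with a different task done in between.  Direct pattern search.
--     for j, me in enumerate(tasks):
--         if any(t != me and t in tasks[j+1:] for t in tasks[:j]):
--             return "NO"
--     return "YES"
-- ===== Notes on version B (the rewrite author's own statement) =====
-- stated objective: alternative
-- what changed: B replaces A's streaming pass (last_task tracking plus a growing visited set with early return on a revisit) by a direct search for the forbidden subsequence pattern t ... me ... t with t != me: for each position it asks whether some earlier value different from the current element recurs later, using prefix/suffix slices and no maintained state.
import Mathlib
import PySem

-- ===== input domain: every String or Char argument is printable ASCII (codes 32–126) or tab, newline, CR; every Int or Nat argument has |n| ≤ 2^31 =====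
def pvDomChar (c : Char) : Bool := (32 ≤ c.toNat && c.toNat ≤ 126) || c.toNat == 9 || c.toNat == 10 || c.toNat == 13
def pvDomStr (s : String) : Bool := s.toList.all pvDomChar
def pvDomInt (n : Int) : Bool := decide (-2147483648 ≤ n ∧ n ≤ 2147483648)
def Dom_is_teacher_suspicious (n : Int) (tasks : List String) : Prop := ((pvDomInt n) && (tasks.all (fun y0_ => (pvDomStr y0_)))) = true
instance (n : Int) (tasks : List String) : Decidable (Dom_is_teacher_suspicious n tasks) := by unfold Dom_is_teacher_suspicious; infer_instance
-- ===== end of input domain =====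

-- B answers by a direct search for the forbidden subsequence pattern t … me … t (t ≠ me)
-- — for each position, does an earlier value ≠ the current one recur later? — instead of
-- A's streaming pass with last_task and a visited set; objective: alternative (a witness
-- search over slices rather than incremental state; not faster).

-- ===== PORT A =====
-- the 'for task in tasks' loop of A, carrying visited_tasks and last_task
def pvALoop : List String → PySem.Set String → Option String → String
  | [], _, _ => "YES"
  | task :: rest, visited, last =>
    if some task ≠ last then
      if task ∈ visited then "NO"
      else pvALoop rest (PySem.Set.add visited task) (some task)
    else pvALoop rest visited (some task)

def is_teacher_suspicious (_n : Int) (tasks : List String) : String :=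
  pvALoop tasks PySem.Set.empty none

-- ===== PORT B =====
-- the 'any(t != me and t in tasks[j+1:] for t in tasks[:j])' condition of B
def pvBBad (tasks : List String) (j : Int) (me : String) : Bool :=
  (PySem.List.slice tasks none (some j)).any
    (fun t => t != me && (PySem.List.slice tasks (some (j + 1)) none).contains t)

-- the 'for j, me in enumerate(tasks)' loop of B with its early return
def pvBLoop (tasks : List String) : List (Int × String) → String
  | [] => "YES"
  | (j, me) :: rest => if pvBBad tasks j me then "NO" else pvBLoop tasks rest

def is_teacher_suspicious_alt (_n : Int) (tasks : List String) : String :=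
  pvBLoop tasks (PySem.List.enumerate tasks)

-- ===== PRECONDITION & SPEC =====
def Spec_is_teacher_suspicious (n : Int) (tasks : List String) (out : String) : Prop := out = is_teacher_suspicious_alt n tasks
instance (n : Int) (tasks : List String) (out : String) : Decidable (Spec_is_teacher_suspicious n tasks out) := by unfold Spec_is_teacher_suspicious; infer_instance

-- ===== CLAIM (what is proved, stated in full; the proofs are below) =====
def Claim_equal_is_teacher_suspicious : Prop := ∀ (n : Int) (tasks : List String), Dom_is_teacher_suspicious n tasks → Spec_is_teacher_suspicious n tasks (is_teacher_suspicious n tasks)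

-- ===== LEMMAS AND PROOFS =====

-- the common characterization both programs decide: a forbidden pattern t … x … t, x ≠ t
def pvBad (l : List String) : Prop := ∃ t x, x ≠ t ∧ [t, x, t].Sublist l

-- run-collapsing with the previous element carried along (A's run structure)
def pvCollapse : Option String → List String → List String
  | _, [] => []
  | last, t :: rest =>
    if some t = last then pvCollapse (some t) rest else t :: pvCollapse (some t) rest

lemma pvALoop_yes : ∀ (tasks : List String) (visited : PySem.Set String) (last : Option String),
    (pvALoop tasks visited last = "YES" ↔
      ((pvCollapse last tasks).Nodup ∧ ∀ t ∈ pvCollapse last tasks, t ∉ visited)) := by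
  intro tasks
  induction tasks with
  | nil => intro visited last; simp [pvALoop, pvCollapse]
  | cons t rest ih =>
      intro visited last
      by_cases hl : some t = last
      · subst hl
        show pvALoop (t :: rest) visited (some t) = "YES" ↔ _
        unfold pvALoop pvCollapse
        rw [if_neg (by simp), if_pos rfl]
        exact ih visited (some t)
      · unfold pvALoop pvCollapse
        rw [if_pos hl, if_neg hl]
        by_cases hv : t ∈ visited
        · rw [if_pos hv]
          constructor
          · intro h; simp at h
          · rintro ⟨-, hall⟩
            exact absurd hv (hall t (List.mem_cons_self))
        · rw [if_neg hv, ih (PySem.Set.add visited t) (some t)]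
          simp only [List.nodup_cons, List.mem_cons, PySem.Set.mem_add]
          constructor
          · rintro ⟨hn, hall⟩
            refine ⟨⟨fun hc => ?_, hn⟩, ?_⟩
            · exact (hall t hc) (Or.inr rfl)
            · rintro s (rfl | hs)
              · exact hv
              · intro hsv; exact (hall s hs) (Or.inl hsv)
          · rintro ⟨⟨htc, hn⟩, hall⟩
            refine ⟨hn, fun s hs => ?_⟩
            rintro (hsv | rfl)
            · exact (hall s (Or.inr hs)) hsv
            · exact htc hs

lemma pvALoop_yes_or_no : ∀ (tasks : List String) (visited : PySem.Set String) (last : Option String),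
    pvALoop tasks visited last = "YES" ∨ pvALoop tasks visited last = "NO" := by
  intro tasks
  induction tasks with
  | nil => intro _ _; left; rfl
  | cons t rest ih =>
      intro visited last
      by_cases hl : some t = last
      · subst hl
        show pvALoop (t :: rest) visited (some t) = "YES" ∨ _
        unfold pvALoop
        rw [if_neg (by simp)]
        exact ih visited (some t)
      · unfold pvALoop
        rw [if_pos hl]
        by_cases hv : t ∈ visited
        · rw [if_pos hv]; right; rfl
        · rw [if_neg hv]
          exact ih (PySem.Set.add visited t) (some t)

-- collapse is a sublist of the original list
lemma pvCollapse_sublist : ∀ (l : List String) (last : Option String),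
    (pvCollapse last l).Sublist l := by
  intro l
  induction l with
  | nil => intro _; simp [pvCollapse]
  | cons a l ih =>
      intro last
      unfold pvCollapse
      split_ifs
      · exact (ih (some a)).trans (List.sublist_cons_self a l)
      · exact (ih (some a)).cons₂ a

-- the head of a collapsed list differs from the carried last element
lemma pvCollapse_head_ne : ∀ (l : List String) (last : Option String) (b : String),
    (pvCollapse last l).head? = some b → some b ≠ last := by
  intro l
  induction l with
  | nil => intro _ b h; simp [pvCollapse] at h
  | cons a l ih =>
      intro last b h
      unfold pvCollapse at h
      split_ifs at h with ha
      · exact ha ▸ ih (some a) b h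
      · simp at h; subst h; exact ha

-- consecutive elements of a collapsed list differ
lemma pvCollapse_chain : ∀ (l : List String) (last : Option String),
    List.IsChain (· ≠ ·) (pvCollapse last l) := by
  intro l
  induction l with
  | nil => intro _; simp [pvCollapse]
  | cons a l ih =>
      intro last
      unfold pvCollapse
      split_ifs
      · exact ih (some a)
      · cases hc : pvCollapse (some a) l with
        | nil => exact List.IsChain.singleton a
        | cons b m =>
            refine List.isChain_cons_cons.2 ⟨?_, hc ▸ ih (some a)⟩
            intro hab
            exact pvCollapse_head_ne l (some a) b (by rw [hc]; rfl) (by rw [hab])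

-- every member value survives collapsing unless it equals the carried last
lemma pvCollapse_mem : ∀ (l : List String) (last : Option String) (t : String),
    t ∈ l → some t ≠ last → t ∈ pvCollapse last l := by
  intro l
  induction l with
  | nil => intro _ _ h; simp at h
  | cons a l ih =>
      intro last t ht hne
      unfold pvCollapse
      split_ifs with ha
      · have hta : t ≠ a := fun h => hne (h ▸ ha)
        have ht' : t ∈ l := by
          rcases List.mem_cons.1 ht with rfl | h
          · exact absurd rfl hta
          · exact h
        exact ih (some a) t ht' (by simpa using hta)
      · rcases List.mem_cons.1 ht with rfl | ht'
        · exact List.mem_cons_self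
        · by_cases hta : t = a
          · subst hta; exact List.mem_cons_self
          · exact List.mem_cons_of_mem a (ih (some a) t ht' (by simpa using hta))

-- after an x ≠ t, a later t always appears in the collapse, whatever was last
lemma pvCollapse_mem_after : ∀ (l : List String) (last : Option String) (t x : String),
    x ≠ t → [x, t].Sublist l → t ∈ pvCollapse last l := by
  intro l
  induction l with
  | nil => intro _ _ _ _ h; simp at h
  | cons b l ih =>
      intro last t x hxt hsub
      have hstep : t ∈ pvCollapse (some b) l → t ∈ pvCollapse last (b :: l) := by
        intro h'
        unfold pvCollapse
        split_ifs
        · exact h'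
        · exact List.mem_cons_of_mem b h'
      rcases List.cons_sublist_cons'.1 hsub with h' | ⟨rfl, h'⟩
      · exact hstep (ih (some b) t x hxt h')
      · have ht : t ∈ l := List.singleton_sublist.1 h'
        exact hstep (pvCollapse_mem l (some x) t ht (by simpa using Ne.symm hxt))

-- a pattern t … x … t forces a duplicate in the collapse
lemma pvCollapse_not_nodup_of_pattern : ∀ (l : List String) (last : Option String) (t x : String),
    x ≠ t → [t, x, t].Sublist l → last ≠ some t → ¬ (pvCollapse last l).Nodup := by
  intro l
  induction l with
  | nil => intro _ _ _ _ h; simp at h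
  | cons a l ih =>
      intro last t x hxt hsub hlast
      by_cases hat : a = t
      · subst hat
        have h' : [x, a].Sublist l := by
          rcases List.cons_sublist_cons'.1 hsub with h' | ⟨-, h'⟩
          · exact (List.sublist_cons_self a [x, a]).trans h'
          · exact h'
        have hmem : a ∈ pvCollapse (some a) l := pvCollapse_mem_after l (some a) a x hxt h'
        unfold pvCollapse
        rw [if_neg (fun h => hlast h.symm)]
        simp [List.nodup_cons, hmem]
      · have h' : [t, x, t].Sublist l := by
          rcases List.cons_sublist_cons'.1 hsub with h' | ⟨h1, -⟩
          · exact h'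
          · exact absurd h1.symm hat
        have hrec := ih (some a) t x hxt h' (by simpa using hat)
        unfold pvCollapse
        split_ifs
        · exact hrec
        · intro hn; exact hrec hn.of_cons

-- a duplicate in a chain-of-≠ list yields the pattern inside it
lemma pvPattern_of_dup : ∀ (c : List String) (t : String),
    List.IsChain (· ≠ ·) c → [t, t].Sublist c → ∃ x, x ≠ t ∧ [t, x, t].Sublist c := by
  intro c
  induction c with
  | nil => intro t _ h; simp at h
  | cons a c ih =>
      intro t hch hsub
      rcases List.cons_sublist_cons'.1 hsub with h' | ⟨rfl, h'⟩
      · obtain ⟨x, hx, hp⟩ := ih t hch.tail h'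
        exact ⟨x, hx, hp.trans (List.sublist_cons_self a c)⟩
      · have ht : t ∈ c := List.singleton_sublist.1 h'
        cases c with
        | nil => simp at ht
        | cons b c' =>
            have hab : t ≠ b := (List.isChain_cons_cons.1 hch).1
            have htc' : t ∈ c' := by
              rcases List.mem_cons.1 ht with rfl | h
              · exact absurd rfl hab
              · exact h
            exact ⟨b, Ne.symm hab,
              List.cons_sublist_cons.2 (List.cons_sublist_cons.2 (List.singleton_sublist.2 htc'))⟩

-- collapse-nodup ↔ no forbidden pattern
lemma pvNodup_iff_not_bad (l : List String) :
    (pvCollapse none l).Nodup ↔ ¬ pvBad l := by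
  constructor
  · rintro hn ⟨t, x, hxt, hsub⟩
    exact pvCollapse_not_nodup_of_pattern l none t x hxt hsub (by simp) hn
  · intro hb
    by_contra hn
    obtain ⟨t, hdup⟩ := List.exists_duplicate_iff_not_nodup.2 hn
    have htt : [t, t].Sublist (pvCollapse none l) := List.duplicate_iff_sublist.1 hdup
    obtain ⟨x, hx, hp⟩ := pvPattern_of_dup _ t (pvCollapse_chain l none) htt
    exact hb ⟨t, x, hx, hp.trans (pvCollapse_sublist l none)⟩

-- ========== B side ==========

lemma pvBLoop_yes (tasks : List String) : ∀ (pairs : List (Int × String)),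
    (pvBLoop tasks pairs = "YES" ↔ ∀ p ∈ pairs, pvBBad tasks p.1 p.2 = false) := by
  intro pairs
  induction pairs with
  | nil => simp [pvBLoop]
  | cons p rest ih =>
      obtain ⟨j, me⟩ := p
      unfold pvBLoop
      by_cases h : pvBBad tasks j me
      · rw [if_pos h]
        constructor
        · intro hh; simp at hh
        · intro hall
          exact absurd (hall (j, me) List.mem_cons_self) (by simp [h])
      · rw [if_neg h, ih]
        constructor
        · intro hall p hp
          rcases List.mem_cons.1 hp with rfl | hp'
          · simpa using h
          · exact hall p hp'
        · intro hall p hp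
          exact hall p (List.mem_cons_of_mem _ hp)

lemma pvBLoop_yes_or_no (tasks : List String) : ∀ (pairs : List (Int × String)),
    pvBLoop tasks pairs = "YES" ∨ pvBLoop tasks pairs = "NO" := by
  intro pairs
  induction pairs with
  | nil => left; rfl
  | cons p rest ih =>
      obtain ⟨j, me⟩ := p
      unfold pvBLoop
      split_ifs
      · right; rfl
      · exact ih

-- extracting positions from the patterns
lemma pvPattern_index2 : ∀ (l : List String) (t x : String), [x, t].Sublist l →
    ∃ (k : Nat) (h : k < l.length), l[k] = x ∧ t ∈ l.drop (k + 1) := by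
  intro l
  induction l with
  | nil => intro t x h; simp at h
  | cons b l ih =>
      intro t x hsub
      rcases List.cons_sublist_cons'.1 hsub with h' | ⟨rfl, h'⟩
      · obtain ⟨k, hk, hx, ht⟩ := ih t x h'
        exact ⟨k + 1, by simpa using hk, by simpa using hx, by simpa using ht⟩
      · exact ⟨0, by simp, by simp, by simpa using List.singleton_sublist.1 h'⟩

lemma pvPattern_index3 : ∀ (l : List String) (t x : String), [t, x, t].Sublist l →
    ∃ (k : Nat) (h : k < l.length), l[k] = x ∧ t ∈ l.take k ∧ t ∈ l.drop (k + 1) := by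
  intro l
  induction l with
  | nil => intro t x h; simp at h
  | cons b l ih =>
      intro t x hsub
      rcases List.cons_sublist_cons'.1 hsub with h' | ⟨rfl, h'⟩
      · obtain ⟨k, hk, hx, ht1, ht2⟩ := ih t x h'
        refine ⟨k + 1, by simpa using hk, by simpa using hx, ?_, by simpa using ht2⟩
        simpa using Or.inr ht1
      · obtain ⟨k, hk, hx, ht⟩ := pvPattern_index2 l t x h'
        refine ⟨k + 1, by simpa using hk, by simpa using hx, ?_, by simpa using ht⟩
        simp
  -- end

lemma pvBBad_iff (tasks : List String) (k : Nat) (hk : k < tasks.length) :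
    pvBBad tasks (k : Int) tasks[k] = true ↔
      ∃ t, t ≠ tasks[k] ∧ t ∈ tasks.take k ∧ t ∈ tasks.drop (k + 1) := by
  unfold pvBBad
  rw [PySem.List.slice_to_natCast]
  have h1 : ((k : Int) + 1) = ((k + 1 : Nat) : Int) := by push_cast; ring
  rw [h1, PySem.List.slice_from_natCast]
  simp [List.any_eq_true, bne_iff_ne]
  tauto

lemma pvB_yes (n : Int) (tasks : List String) :
    is_teacher_suspicious_alt n tasks = "YES" ↔ ¬ pvBad tasks := by
  unfold is_teacher_suspicious_alt
  rw [pvBLoop_yes]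
  constructor
  · rintro hall ⟨t, x, hxt, hsub⟩
    obtain ⟨k, hk, hx, ht1, ht2⟩ := pvPattern_index3 tasks t x hsub
    have hp : ((k : Int), tasks[k]) ∈ PySem.List.enumerate tasks := by
      rw [PySem.List.mem_enumerate_iff]
      exact ⟨k, hk, by simp⟩
    have := hall _ hp
    rw [show (((k : Int), tasks[k]) : Int × String).1 = (k : Int) from rfl] at this
    have hbad : pvBBad tasks (k : Int) tasks[k] = true :=
      (pvBBad_iff tasks k hk).2 ⟨t, by rw [hx]; exact Ne.symm hxt, ht1, ht2⟩
    rw [this] at hbad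
    exact absurd hbad (by simp)
  · intro hb p hp
    rw [PySem.List.mem_enumerate_iff] at hp
    obtain ⟨k, hk, rfl⟩ := hp
    by_contra hbad
    rw [Bool.not_eq_false] at hbad
    have hbad' : pvBBad tasks (k : Int) tasks[k] = true := by simpa using hbad
    obtain ⟨t, htne, ht1, ht2⟩ := (pvBBad_iff tasks k hk).1 hbad'
    refine hb ⟨t, tasks[k], Ne.symm htne, ?_⟩
    have hdrop : tasks.drop k = tasks[k] :: tasks.drop (k + 1) :=
      List.drop_eq_getElem_cons hk
    have hsub1 : [t].Sublist (tasks.take k) := List.singleton_sublist.2 ht1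
    have hsub2 : [tasks[k], t].Sublist (tasks.drop k) := by
      rw [hdrop]
      exact List.cons_sublist_cons.2 (List.singleton_sublist.2 ht2)
    have := hsub1.append hsub2
    simpa [List.take_append_drop] using this

-- ===== VERDICT (by name: the statement is the Claim_ definition above) =====
theorem is_teacher_suspicious_spec : Claim_equal_is_teacher_suspicious := by
  intro n tasks _
  show is_teacher_suspicious n tasks = is_teacher_suspicious_alt n tasks
  have hA : is_teacher_suspicious n tasks = "YES" ↔ ¬ pvBad tasks := by
    rw [← pvNodup_iff_not_bad]
    unfold is_teacher_suspicious
    rw [pvALoop_yes tasks PySem.Set.empty none]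
    simp [PySem.Set.empty]
  have hAB : is_teacher_suspicious n tasks = "YES" ↔ is_teacher_suspicious_alt n tasks = "YES" :=
    hA.trans (pvB_yes n tasks).symm
  have ha := pvALoop_yes_or_no tasks PySem.Set.empty none
  have hb := pvBLoop_yes_or_no tasks (PySem.List.enumerate tasks)
  rcases ha with ha | ha <;> rcases hb with hb | hb
  · rw [show is_teacher_suspicious n tasks = _ from ha,
        show is_teacher_suspicious_alt n tasks = _ from hb]
  · exact absurd (hAB.1 ha) (by rw [show is_teacher_suspicious_alt n tasks = _ from hb]; simp)
  · exact absurd (hAB.2 hb) (by rw [show is_teacher_suspicious n tasks = _ from ha]; simp)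
  · rw [show is_teacher_suspicious n tasks = _ from ha,
        show is_teacher_suspicious_alt n tasks = _ from hb]
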